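-- pv_equiv track=rewrite | github.com/ptrajdos/FKNN2025 | dexterous_bioprosthesis_2021_raw_datasets_framework/estimators/meta/attribute_combination_weight_estim_nb.py | channel_group_filter_even_and_odd
-- ===== SOURCE A (Python) =====
-- def channel_group_filter_even_and_odd(group_list):
--     for group in group_list:
--         if len(group) == 1:
--             yield group
--             continue
--
--         all_even = all(group[i] % 2 == 0 for i in range(len(group)))
--         all_odd = all(group[i] % 2 == 1 for i in range(len(group)))
--         if all_even or all_odd:
--             yield group
--             continue
-- ===== SOURCE B (Python) =====
-- def channel_group_filter_even_and_odd(group_list):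
--     # one pass per group: collect the set of parities; keep the group iff it has
--     # at most one distinct parity (this subsumes the singleton case)
--     for group in group_list:
--         parities = {x % 2 for x in group}
--         if len(parities) <= 1:
--             yield group
-- ===== Notes on version B (the rewrite author's own statement) =====
-- stated objective: simpler
-- what changed: Replaces the singleton special case plus two separate index-loop all() scans with a single pass that collects each group's residues mod 2 into a set and keeps the group iff the set has at most one element.
import Mathlib
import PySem

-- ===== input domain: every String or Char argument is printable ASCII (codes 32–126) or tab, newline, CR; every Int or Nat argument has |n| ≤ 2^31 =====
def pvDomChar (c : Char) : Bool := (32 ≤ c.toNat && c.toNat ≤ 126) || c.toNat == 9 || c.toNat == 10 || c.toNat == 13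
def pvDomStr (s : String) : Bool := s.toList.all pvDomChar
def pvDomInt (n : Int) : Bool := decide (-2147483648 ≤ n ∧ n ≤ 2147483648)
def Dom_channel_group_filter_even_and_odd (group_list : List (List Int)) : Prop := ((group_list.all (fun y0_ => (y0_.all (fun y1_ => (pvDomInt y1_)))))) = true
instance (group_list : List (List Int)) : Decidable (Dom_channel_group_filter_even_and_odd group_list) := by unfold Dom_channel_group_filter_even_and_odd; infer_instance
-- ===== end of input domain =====

-- B drops A's singleton special case and replaces its two index-loop all() scans
-- by a single pass collecting the set of residues mod 2 (objective: simpler).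

-- ===== PORT A =====
def channel_group_filter_even_and_odd (group_list : List (List Int)) : List (List Int) :=
  group_list.foldl (fun acc group =>
    if group.length = 1 then acc ++ [group]
    else
      let all_even := (PySem.List.pyRange 0 (group.length : Int) 1).all
        (fun i => PySem.Int.mod (PySem.List.pyGetD group i 0) 2 == 0)
      let all_odd := (PySem.List.pyRange 0 (group.length : Int) 1).all
        (fun i => PySem.Int.mod (PySem.List.pyGetD group i 0) 2 == 1)
      if all_even || all_odd then acc ++ [group] else acc) []

-- ===== PORT B =====
def channel_group_filter_even_and_odd_alt (group_list : List (List Int)) : List (List Int) :=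
  group_list.foldl (fun acc group =>
    let parities : PySem.Set Int := PySem.Set.ofList (group.map (fun x => PySem.Int.mod x 2))
    if parities.length ≤ 1 then acc ++ [group] else acc) []

-- ===== PRECONDITION & SPEC =====
def Spec_channel_group_filter_even_and_odd (group_list : List (List Int)) (out : List (List Int)) : Prop := out = channel_group_filter_even_and_odd_alt group_list
instance (group_list : List (List Int)) (out : List (List Int)) : Decidable (Spec_channel_group_filter_even_and_odd group_list out) := by unfold Spec_channel_group_filter_even_and_odd; infer_instance

-- ===== CLAIM (what is proved, stated in full; the proofs are below) =====
def Claim_equal_channel_group_filter_even_and_odd : Prop := ∀ (group_list : List (List Int)), Dom_channel_group_filter_even_and_odd group_list → Spec_channel_group_filter_even_and_odd group_list (channel_group_filter_even_and_odd group_list)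

-- ===== LEMMAS AND PROOFS =====

-- indexed all() over range(len(g)) is elementwise all
theorem all_pyRange_pyGetD (g : List Int) (p : Int → Bool) :
    ((PySem.List.pyRange 0 (g.length : Int) 1).all (fun i => p (PySem.List.pyGetD g i 0)))
      = g.all p := by
  have h := PySem.List.map_pyGetD_pyRange_zero' g (0 : Int)
  calc ((PySem.List.pyRange 0 (g.length : Int) 1).all (fun i => p (PySem.List.pyGetD g i 0)))
      = ((PySem.List.pyRange 0 (g.length : Int) 1).map (fun i => PySem.List.pyGetD g i 0)).all p := by
        rw [List.all_map]; rfl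
    _ = g.all p := by rw [h]

-- a nodup list whose elements are all equal has at most one element
theorem nodup_const_len_le_one {α : Type} (s : List α) (hnd : s.Nodup)
    (h : ∀ x ∈ s, ∀ y ∈ s, x = y) : s.length ≤ 1 := by
  match s with
  | [] => simp
  | [_] => simp
  | x :: y :: t =>
    exfalso
    have hxy : x = y := h x (by simp) y (by simp)
    rw [List.nodup_cons] at hnd
    exact hnd.1 (by simp [hxy])

theorem set_len_le_one_iff {α : Type} [DecidableEq α] (l : List α) :
    (PySem.Set.ofList l).length ≤ 1 ↔ ∀ x ∈ l, ∀ y ∈ l, x = y := by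
  constructor
  · intro h x hx y hy
    have hx' : x ∈ PySem.Set.ofList l := (PySem.Set.mem_ofList _ _).2 hx
    have hy' : y ∈ PySem.Set.ofList l := (PySem.Set.mem_ofList _ _).2 hy
    match hs : PySem.Set.ofList l with
    | [] => rw [hs] at hx'; simp at hx'
    | [z] => rw [hs] at hx' hy'; simp at hx' hy'; rw [hx', hy']
    | _ :: _ :: _ => rw [hs] at h; simp at h
  · intro h
    apply nodup_const_len_le_one _ (PySem.Set.nodup_ofList l)
    intro x hx y hy
    exact h x ((PySem.Set.mem_ofList _ _).1 hx) y ((PySem.Set.mem_ofList _ _).1 hy)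

theorem mod_two_cases (x : Int) : PySem.Int.mod x 2 = 0 ∨ PySem.Int.mod x 2 = 1 := by
  rw [PySem.Int.mod_eq_emod_of_pos (by norm_num : (0:Int) < 2)]
  omega

-- the per-group keep conditions of A and B agree
theorem cond_eq (g : List Int) :
    (if g.length = 1 then True else
      ((g.all (fun x => PySem.Int.mod x 2 == 0) || g.all (fun x => PySem.Int.mod x 2 == 1)) = true))
    ↔ (PySem.Set.ofList (g.map (fun x => PySem.Int.mod x 2))).length ≤ 1 := by
  rw [set_len_le_one_iff]
  split_ifs with h1
  · constructor
    · intro _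
      match g, h1 with
      | [a], _ => simp
    · intro _; trivial
  · simp only [Bool.or_eq_true, List.all_eq_true, beq_iff_eq, List.mem_map]
    constructor
    · rintro (he | ho) x hx y hy
      · obtain ⟨u, hu, rfl⟩ := hx; obtain ⟨v, hv, rfl⟩ := hy
        rw [he u hu, he v hv]
      · obtain ⟨u, hu, rfl⟩ := hx; obtain ⟨v, hv, rfl⟩ := hy
        rw [ho u hu, ho v hv]
    · intro h
      match g with
      | [] => left; intro x hx; simp at hx
      | a :: t =>
        have ha : ∀ x ∈ a :: t, PySem.Int.mod x 2 = PySem.Int.mod a 2 := by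
          intro x hx
          exact h _ ⟨x, hx, rfl⟩ _ ⟨a, by simp, rfl⟩
        rcases mod_two_cases a with h0 | h0
        · left; intro x hx; rw [ha x hx, h0]
        · right; intro x hx; rw [ha x hx, h0]

theorem step_eq (acc : List (List Int)) (g : List Int) :
    (if g.length = 1 then acc ++ [g]
    else
      let all_even := (PySem.List.pyRange 0 (g.length : Int) 1).all
        (fun i => PySem.Int.mod (PySem.List.pyGetD g i 0) 2 == 0)
      let all_odd := (PySem.List.pyRange 0 (g.length : Int) 1).all
        (fun i => PySem.Int.mod (PySem.List.pyGetD g i 0) 2 == 1)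
      if all_even || all_odd then acc ++ [g] else acc)
    = (if (PySem.Set.ofList (g.map (fun x => PySem.Int.mod x 2))).length ≤ 1
        then acc ++ [g] else acc) := by
  have hc := cond_eq g
  by_cases h1 : g.length = 1
  · rw [if_pos h1, if_pos (hc.mp (by simp [h1]))]
  · rw [if_neg h1]
    simp only [all_pyRange_pyGetD g (fun x => PySem.Int.mod x 2 == 0),
               all_pyRange_pyGetD g (fun x => PySem.Int.mod x 2 == 1)]
    show (if ((g.all fun x => PySem.Int.mod x 2 == 0) || g.all fun x => PySem.Int.mod x 2 == 1) = true
          then acc ++ [g] else acc) = _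
    · by_cases h2 : ((g.all fun x => PySem.Int.mod x 2 == 0) || g.all fun x => PySem.Int.mod x 2 == 1) = true
      · rw [if_pos h2, if_pos (hc.mp (by simp only [if_neg h1]; exact h2))]
      · rw [if_neg h2, if_neg (fun h3 => h2 (by simpa only [if_neg h1] using hc.mpr h3))]

theorem foldl_eq (gl : List (List Int)) (acc : List (List Int)) :
    gl.foldl (fun acc group =>
      if group.length = 1 then acc ++ [group]
      else
        let all_even := (PySem.List.pyRange 0 (group.length : Int) 1).all
          (fun i => PySem.Int.mod (PySem.List.pyGetD group i 0) 2 == 0)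
        let all_odd := (PySem.List.pyRange 0 (group.length : Int) 1).all
          (fun i => PySem.Int.mod (PySem.List.pyGetD group i 0) 2 == 1)
        if all_even || all_odd then acc ++ [group] else acc) acc
    = gl.foldl (fun acc group =>
        let parities : PySem.Set Int := PySem.Set.ofList (group.map (fun x => PySem.Int.mod x 2))
        if parities.length ≤ 1 then acc ++ [group] else acc) acc := by
  simp only [step_eq]

-- ===== VERDICT (by name: the statement is the Claim_ definition above) =====
theorem channel_group_filter_even_and_odd_spec : Claim_equal_channel_group_filter_even_and_odd := by
  intro gl _
  unfold Spec_channel_group_filter_even_and_odd channel_group_filter_even_and_odd channel_group_filter_even_and_odd_alt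
  exact foldl_eq gl []
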